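-- pv_equiv track=rewrite | github.com/dcgfz2/SubtituionCrack | betterSubCrack.py | patternFinder
-- ===== SOURCE A (Python) =====
-- def patternFinder(word):
--     lettermap = ''
--     pattern = ''
--     for char in word.upper():
--         if char.upper() in lettermap:
--             syIndex = lettermap.find(char.upper())
--             pattern += str(syIndex)
--         else:
--             pattern += str(len(lettermap))
--             lettermap += char.upper()
--     return pattern
-- ===== SOURCE B (Python) =====
-- def patternFinder(word):
--     upper = word.upper()
--     occ = {}
--     for i, ch in enumerate(upper):
--         occ.setdefault(ch, []).append(i)
--     out = [""] * len(upper)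
--     for rank, positions in enumerate(occ.values()):
--         s = str(rank)
--         for i in positions:
--             out[i] = s
--     return "".join(out)
-- ===== Notes on version B (the rewrite author's own statement) =====
-- stated objective: alternative
-- what changed: Inverts the traversal: instead of A's single per-character loop that rescans the growing lettermap with .find to emit each digit in place, B first groups all positions by character in one pass, then scatters each first-occurrence rank into a preallocated output array group by group and joins.
import Mathlib
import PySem

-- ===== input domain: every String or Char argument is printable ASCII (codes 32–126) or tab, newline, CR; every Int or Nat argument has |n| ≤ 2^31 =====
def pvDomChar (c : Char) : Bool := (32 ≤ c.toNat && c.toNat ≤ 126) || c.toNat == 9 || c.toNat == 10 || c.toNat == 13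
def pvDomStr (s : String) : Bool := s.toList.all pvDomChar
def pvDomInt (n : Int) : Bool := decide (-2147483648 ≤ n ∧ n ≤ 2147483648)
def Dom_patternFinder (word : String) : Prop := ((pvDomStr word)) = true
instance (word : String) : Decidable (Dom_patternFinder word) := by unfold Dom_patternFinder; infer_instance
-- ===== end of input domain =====

-- B inverts A's traversal: instead of A's per-character loop that rescans the growing lettermap
-- with .find to emit each digit in place, B groups all positions by character in one pass and then
-- scatters each first-occurrence rank into a preallocated output array group by group (alternative).

-- ===== PORT A =====
-- literal port: state (lettermap, pattern); 'x in s' = Chars.isIn, s.find(x) = Chars.find,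
-- str(n) = Int.toStr, char.upper() = Chars.upperChar (exact on ASCII)
def patternFinder (word : String) : String :=
  ((PySem.Str.upper word).toList.foldl
    (fun (st : List Char × String) char =>
      if PySem.Chars.isIn [PySem.Chars.upperChar char] st.1 then
        (st.1, st.2 ++ PySem.Int.toStr (PySem.Chars.find st.1 [PySem.Chars.upperChar char]))
      else
        (st.1 ++ [PySem.Chars.upperChar char], st.2 ++ PySem.Int.toStr (st.1.length : Int)))
    ([], "")).2

-- ===== PORT B =====
-- literal port of Source B: pass 1 groups positions by character ('occ.setdefault(ch, []).append(i)'
-- = overwrite-in-place insert of the old list extended by i); pass 2 scatters str(rank) into the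
-- preallocated out list ('out[i] = s' = pySetD, exact since 0 ≤ i < len(out) always holds here)
def patternFinder_alt (word : String) : String :=
  let upper := (PySem.Str.upper word).toList
  let occ := (PySem.List.enumerate upper).foldl
    (fun (d : PySem.Dict Char (List Int)) p => d.insert p.2 (d.getD p.2 [] ++ [p.1]))
    PySem.Dict.empty
  let out := (PySem.List.enumerate occ.values).foldl
    (fun (o : List String) rp =>
      rp.2.foldl (fun o i => PySem.List.pySetD o i (PySem.Int.toStr rp.1)) o)
    (List.replicate upper.length "")
  String.join out

-- ===== PRECONDITION & SPEC =====
def Spec_patternFinder (word : String) (out : String) : Prop := out = patternFinder_alt word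
instance (word : String) (out : String) : Decidable (Spec_patternFinder word out) := by unfold Spec_patternFinder; infer_instance

-- ===== CLAIM (what is proved, stated in full; the proofs are below) =====
def Claim_equal_patternFinder : Prop := ∀ (word : String), Dom_patternFinder word → Spec_patternFinder word (patternFinder word)

-- ===== LEMMAS AND PROOFS =====

-- ---------- shared characterization target ----------
-- both programs compute String.join (cs.map fun c => toStr ((dedup cs).idxOf c)) on cs = upper(word)

-- A's loop body with char.upper() removed (on the already-uppercased string it is the identity)
def pvStepA (st : List Char × String) (c : Char) : List Char × String :=
  if PySem.Chars.isIn [c] st.1 then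
    (st.1, st.2 ++ PySem.Int.toStr (PySem.Chars.find st.1 [c]))
  else
    (st.1 ++ [c], st.2 ++ PySem.Int.toStr (st.1.length : Int))

def pvStepB (d : PySem.Dict Char Int) (c : Char) : PySem.Dict Char Int :=
  if d.contains c then d else d.insert c (d.size : Int)

-- the dict is exactly the lettermap paired with positions
def pvRel (L : List Char) (d : PySem.Dict Char Int) : Prop :=
  d.items = L.zipIdx.map (fun p => (p.1, (p.2 : Int)))

theorem pv_upperChar_idem (c : Char) :
    PySem.Chars.upperChar (PySem.Chars.upperChar c) = PySem.Chars.upperChar c := by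
  unfold PySem.Chars.upperChar PySem.Chars.islower
  split
  · rename_i h
    simp only [Bool.and_eq_true, decide_eq_true_eq] at h
    have h1 : 97 ≤ c.toNat := h.1
    have h2 : c.toNat ≤ 122 := h.2
    have ht : (Char.ofNat (c.toNat - 32)).toNat = c.toNat - 32 := by
      unfold Char.ofNat
      split
      · rfl
      · rename_i hv
        simp [Nat.isValidChar] at hv
        omega
    rw [if_neg]
    simp only [Bool.and_eq_true, decide_eq_true_eq, not_and]
    intro hcon
    have : 97 ≤ (Char.ofNat (c.toNat - 32)).toNat := hcon
    omega
  · rfl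

theorem pv_singleton_prefix (l : List Char) (c : Char) : [c] <+: l ↔ l.head? = some c := by
  cases l with
  | nil => simp
  | cons a t => simp [List.cons_prefix_cons, eq_comm]

theorem pv_isIn_singleton (l : List Char) (c : Char) :
    PySem.Chars.isIn [c] l = decide (c ∈ l) := by
  by_cases h : c ∈ l
  · simp [h, (PySem.Chars.isIn_iff_infix [c] l).2 ((List.singleton_infix_iff c l).2 h)]
  · simp only [h, decide_false]
    by_contra hc
    exact h ((List.singleton_infix_iff c l).1
      ((PySem.Chars.isIn_iff_infix [c] l).1 (by simpa using hc)))

theorem pv_idxOf_spec (l : List Char) (c : Char) (k : Nat) (hk : k < l.length)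
    (h1 : l[k] = c) (h2 : ∀ i (_ : i < k), l[i] ≠ c) : l.idxOf c = k := by
  induction l generalizing k with
  | nil => simp at hk
  | cons a t ih =>
    cases k with
    | zero => simp_all
    | succ k =>
      have ha : a ≠ c := by have := h2 0 (Nat.succ_pos _); simpa using this
      rw [List.idxOf_cons_ne _ (by simpa using ha)]
      simp only [List.length_cons] at hk
      rw [ih k (by omega) (by simpa using h1)
        (fun i hi => by have := h2 (i+1) (by omega); simpa using this)]

theorem pv_find_singleton (l : List Char) (c : Char) (h : c ∈ l) :
    PySem.Chars.find l [c] = (l.idxOf c : Int) := by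
  have hnn : 0 ≤ PySem.Chars.find l [c] :=
    (PySem.Chars.find_nonneg_iff l [c]).2 ((List.singleton_infix_iff c l).2 h)
  obtain ⟨hp, hmin⟩ := PySem.Chars.find_spec hnn
  set k := (PySem.Chars.find l [c]).toNat with hkdef
  have hget : l[k]? = some c := by
    have := (pv_singleton_prefix _ c).1 hp
    rwa [List.head?_drop] at this
  have hk : k < l.length := by
    by_contra hc
    simp [List.getElem?_eq_none (by omega : l.length ≤ k)] at hget
  have hidx : l.idxOf c = k := by
    refine pv_idxOf_spec l c k hk (by simpa [List.getElem?_eq_getElem hk] using hget) ?_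
    intro i hi hcon
    exact hmin i hi ((pv_singleton_prefix _ c).2
      (by rw [List.head?_drop, List.getElem?_eq_getElem (by omega), hcon]))
  rw [hidx, hkdef, Int.toNat_of_nonneg hnn]

theorem pv_keys_of_rel (L : List Char) (d : PySem.Dict Char Int) (h : pvRel L d) :
    d.keys = L := by
  unfold pvRel at h
  simp only [PySem.Dict.keys, h, List.map_map]
  have he : (Prod.fst ∘ fun p : Char × Nat => ((p.1 : Char), (p.2 : Int))) = Prod.fst := rfl
  rw [he]
  exact List.zipIdx_map_fst 0 L

theorem pv_size_of_rel (L : List Char) (d : PySem.Dict Char Int) (h : pvRel L d) :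
    d.size = L.length := by
  unfold pvRel at h
  simp [PySem.Dict.size, h]

theorem pv_getD_of_rel (L : List Char) (d : PySem.Dict Char Int) (h : pvRel L d)
    (hnd : L.Nodup) (c : Char) (hc : c ∈ L) : d.getD c 0 = (L.idxOf c : Int) := by
  have hmem : (c, (L.idxOf c : Int)) ∈ d.items := by
    rw [h]
    have : (c, L.idxOf c) ∈ L.zipIdx := by
      rw [List.mk_mem_zipIdx_iff_getElem?]
      exact List.getElem?_idxOf hc
    exact List.mem_map.2 ⟨(c, L.idxOf c), this, rfl⟩
  have hnk : d.keys.Nodup := by rw [pv_keys_of_rel L d h]; exact hnd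
  rw [PySem.Dict.getD_eq_get?_getD, PySem.Dict.get?_of_mem_items d hmem hnk]
  rfl

theorem pv_join_cons (a : String) (l : List String) : String.join (a :: l) = a ++ String.join l := by
  have key : ∀ (t : List String) (x : String),
      t.foldl (fun r s => r ++ s) x = x ++ t.foldl (fun r s => r ++ s) "" := by
    intro t
    induction t with
    | nil => intro x; simp
    | cons b t ih =>
      intro x
      simp only [List.foldl_cons]
      rw [ih (x ++ b), ih ("" ++ b)]
      simp [String.append_assoc]
  simp only [String.join, List.foldl_cons]
  rw [key l ("" ++ a)]
  simp

theorem pv_idxOf_prefix (L M : List Char) (c : Char) (h : L <+: M) (hc : c ∈ L) :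
    M.idxOf c = L.idxOf c := by
  obtain ⟨t, rfl⟩ := h
  exact List.idxOf_append_of_mem hc

-- ---------- A's loop: invariant, pattern characterization ----------
theorem pv_main (cs : List Char) : ∀ (L : List Char) (d : PySem.Dict Char Int) (p : String),
    L.Nodup → pvRel L d →
    ((cs.foldl pvStepA (L, p)).1.Nodup ∧
     pvRel (cs.foldl pvStepA (L, p)).1 (cs.foldl pvStepB d) ∧
     L <+: (cs.foldl pvStepA (L, p)).1 ∧
     (∀ c ∈ cs, c ∈ (cs.foldl pvStepA (L, p)).1) ∧
     (cs.foldl pvStepA (L, p)).2 =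
       p ++ String.join (cs.map (fun c => PySem.Int.toStr ((cs.foldl pvStepB d).getD c 0)))) := by
  induction cs with
  | nil =>
    intro L d p hnd hrel
    exact ⟨hnd, hrel, List.prefix_refl L, by simp, by simp [String.join]⟩
  | cons c cs ih =>
    intro L d p hnd hrel
    have hkeys := pv_keys_of_rel L d hrel
    by_cases hc : c ∈ L
    · have hisA : PySem.Chars.isIn [c] L = true := by
        rw [pv_isIn_singleton]; simpa
      have hcont : d.contains c = true :=
        (PySem.Dict.contains_iff_mem_keys d c).2 (hkeys ▸ hc)
      simp only [List.foldl_cons, pvStepA, pvStepB, hisA, hcont, if_pos]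
      obtain ⟨h1, h2, h3, hm, h4⟩ := ih L d (p ++ PySem.Int.toStr (PySem.Chars.find L [c])) hnd hrel
      refine ⟨h1, h2, h3, ?_, ?_⟩
      · intro x hx
        rcases List.mem_cons.1 hx with rfl | hx
        · exact h3.subset hc
        · exact hm x hx
      · rw [h4, List.map_cons, pv_join_cons, ← String.append_assoc]
        rw [pv_getD_of_rel _ _ h2 h1 c (h3.subset hc), pv_idxOf_prefix L _ c h3 hc,
          pv_find_singleton L c hc]
    · have hisA : PySem.Chars.isIn [c] L = false := by
        rw [pv_isIn_singleton]; simpa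
      have hcont : d.contains c = false := by
        rw [← Bool.not_eq_true]
        intro hcon
        exact hc (hkeys ▸ (PySem.Dict.contains_iff_mem_keys d c).1 hcon)
      have hsize : d.size = L.length := pv_size_of_rel L d hrel
      have hnd1 : (L ++ [c]).Nodup :=
        List.Nodup.append hnd (List.nodup_singleton c) (by simpa using hc)
      have hrel1 : pvRel (L ++ [c]) (d.insert c (d.size : Int)) := by
        unfold pvRel
        rw [PySem.Dict.items_insert_of_not_contains d _ hcont, hrel, hsize,
          List.zipIdx_append, List.map_append]
        simp
      simp only [List.foldl_cons, pvStepA, pvStepB, hisA, hcont, Bool.false_eq_true,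
        if_false]
      obtain ⟨h1, h2, h3, hm, h4⟩ :=
        ih (L ++ [c]) (d.insert c (d.size : Int)) (p ++ PySem.Int.toStr (L.length : Int)) hnd1 hrel1
      refine ⟨h1, h2, (List.prefix_append L [c]).trans h3, ?_, ?_⟩
      · intro x hx
        rcases List.mem_cons.1 hx with rfl | hx
        · exact h3.subset (by simp)
        · exact hm x hx
      · rw [h4, List.map_cons, pv_join_cons, ← String.append_assoc]
        rw [pv_getD_of_rel _ _ h2 h1 c (h3.subset (by simp)),
          pv_idxOf_prefix (L ++ [c]) _ c h3 (by simp), List.idxOf_append, if_neg hc]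
        simp

-- A's lettermap is exactly PySem.Set.add folded, i.e. dedup
theorem pv_fst_foldA (cs : List Char) : ∀ (L : List Char) (p : String),
    (cs.foldl pvStepA (L, p)).1 = cs.foldl PySem.Set.add L := by
  induction cs with
  | nil => intro L p; rfl
  | cons c cs ih =>
    intro L p
    have hadd : PySem.Set.add L c = if c ∈ L then L else L ++ [c] := by
      by_cases hc : c ∈ L <;> simp [PySem.Set.add, PySem.Set.contains, hc]
    simp only [List.foldl_cons, pvStepA, hadd]
    rw [pv_isIn_singleton]
    by_cases hc : c ∈ L
    · simp only [hc, decide_true, if_true]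
      exact ih L _
    · simp only [hc, decide_false, Bool.false_eq_true, if_false]
      exact ih (L ++ [c]) _

-- A's output, characterized
theorem pvA_char (cs : List Char) :
    (cs.foldl pvStepA ([], "")).2 =
      String.join (cs.map (fun c => PySem.Int.toStr ((PySem.List.dedup cs).idxOf c : Int))) := by
  obtain ⟨h1, h2, -, hm, h4⟩ := pv_main cs [] PySem.Dict.empty "" List.nodup_nil (by unfold pvRel; rfl)
  have hLf : (cs.foldl pvStepA ([], "")).1 = PySem.List.dedup cs := by
    rw [pv_fst_foldA]
    unfold PySem.List.dedup
    rw [PySem.Set.ofList_eq_foldl]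
  rw [h4, String.empty_append]
  congr 1
  apply List.map_congr_left
  intro c hc
  rw [pv_getD_of_rel _ _ h2 h1 c (hm c hc), hLf]

-- ---------- B's loop: grouping characterization, scatter characterization ----------

-- positions of c in cs, as ints, in order (what occ's value at c is)
def pvPos (cs : List Char) (c : Char) : List Int :=
  (PySem.List.enumerate cs).filterMap (fun p => if p.2 = c then some p.1 else none)

def pvOccStep (d : PySem.Dict Char (List Int)) (p : Int × Char) : PySem.Dict Char (List Int) :=
  d.insert p.2 (d.getD p.2 [] ++ [p.1])

def pvScat (o : List String) (rp : Int × List Int) : List String :=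
  rp.2.foldl (fun o i => PySem.List.pySetD o i (PySem.Int.toStr rp.1)) o

theorem pv_mem_pvPos (cs : List Char) (c : Char) (j : Int) :
    j ∈ pvPos cs c ↔ ∃ (k : Nat) (h : k < cs.length), j = (k : Int) ∧ cs[k] = c := by
  unfold pvPos
  simp only [List.mem_filterMap, PySem.List.mem_enumerate_iff]
  constructor
  · rintro ⟨p, ⟨k, hk, rfl⟩, hp⟩
    simp only [zero_add] at hp ⊢
    split at hp
    · exact ⟨k, hk, by simpa using hp.symm, by assumption⟩
    · exact absurd hp (by simp)
  · rintro ⟨k, hk, rfl, hck⟩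
    exact ⟨((k : Int), cs[k]), ⟨k, hk, by simp⟩, by simp [hck]⟩

theorem pv_pvPos_nonneg (cs : List Char) (c : Char) (j : Int) (h : j ∈ pvPos cs c) : 0 ≤ j := by
  obtain ⟨k, -, rfl, -⟩ := (pv_mem_pvPos cs c j).1 h
  exact Int.natCast_nonneg k

theorem pv_natCast_mem_pvPos (cs : List Char) (c : Char) (i : Nat) (h : i < cs.length) :
    ((i : Int) ∈ pvPos cs c ↔ cs[i] = c) := by
  rw [pv_mem_pvPos]
  constructor
  · rintro ⟨k, hk, hik, hck⟩
    have : i = k := by exact_mod_cast hik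
    subst this; exact hck
  · intro hc; exact ⟨i, h, rfl, hc⟩

theorem pv_pvPos_append (cs : List Char) (d c : Char) :
    pvPos (cs ++ [d]) c = pvPos cs c ++ (if d = c then [((cs.length : Int))] else []) := by
  unfold pvPos
  rw [PySem.List.enumerate_append, List.filterMap_append]
  congr 1
  by_cases h : d = c <;> simp [PySem.List.enumerate_cons, h]

theorem pv_pvPos_nil_of_not_mem (cs : List Char) (c : Char) (h : c ∉ cs) : pvPos cs c = [] := by
  rw [List.eq_nil_iff_forall_not_mem]
  intro j hj
  obtain ⟨k, hk, -, hck⟩ := (pv_mem_pvPos cs c j).1 hj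
  exact h (hck ▸ List.getElem_mem hk)

theorem pv_dedup_append (cs : List Char) (d : Char) :
    PySem.List.dedup (cs ++ [d]) =
      if d ∈ cs then PySem.List.dedup cs else PySem.List.dedup cs ++ [d] := by
  unfold PySem.List.dedup
  rw [PySem.Set.ofList_eq_foldl, PySem.Set.ofList_eq_foldl, List.foldl_append]
  simp only [List.foldl_cons, List.foldl_nil, PySem.Set.add]
  have hmem : (List.foldl PySem.Set.add [] cs).contains d = decide (d ∈ cs) := by
    rw [← PySem.Set.ofList_eq_foldl]
    simp [PySem.Set.mem_ofList]
  rw [hmem]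
  by_cases h : d ∈ cs <;> simp [h]

-- occ's items are exactly: distinct chars in first-occurrence order, each with its position list
theorem pv_occ_items (cs : List Char) :
    ((PySem.List.enumerate cs).foldl pvOccStep PySem.Dict.empty).items =
      (PySem.List.dedup cs).map (fun k => (k, pvPos cs k)) := by
  induction cs using List.reverseRecOn with
  | nil => rfl
  | append_singleton cs d ih =>
    rw [PySem.List.enumerate_append, List.foldl_append]
    simp only [PySem.List.enumerate_cons, PySem.List.enumerate_nil, List.foldl_cons,
      List.foldl_nil]
    set D := (PySem.List.enumerate cs).foldl pvOccStep PySem.Dict.empty with hD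
    have hkeys : D.keys = PySem.List.dedup cs := by
      simp only [PySem.Dict.keys, ih, List.map_map]
      rw [show ((fun x : Char × List Int => x.1) ∘ fun k => (k, pvPos cs k)) = id from rfl,
        List.map_id]
    have hknd : D.keys.Nodup := by rw [hkeys]; exact PySem.List.nodup_dedup cs
    unfold pvOccStep
    by_cases hd : d ∈ cs
    · have hcont : D.contains d = true := by
        rw [PySem.Dict.contains_eq_decide_mem_keys, hkeys]
        simp [hd]
      have hget : D.getD d [] = pvPos cs d := by
        have hmem : (d, pvPos cs d) ∈ D.items := by
          rw [ih]
          exact List.mem_map.2 ⟨d, (PySem.List.mem_dedup cs d).2 hd, rfl⟩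
        rw [PySem.Dict.getD_eq_get?_getD, PySem.Dict.get?_of_mem_items D hmem hknd]
        rfl
      rw [PySem.Dict.items_insert_of_contains D _ hcont, ih, List.map_map,
        pv_dedup_append, if_pos hd]
      apply List.map_congr_left
      intro k hk
      simp only [Function.comp_apply, beq_iff_eq]
      by_cases hkd : k = d
      · subst hkd
        simp [pv_pvPos_append, hget]
      · simp [pv_pvPos_append, hkd, Ne.symm hkd]
    · have hcont : D.contains d = false := by
        rw [PySem.Dict.contains_eq_decide_mem_keys, hkeys]
        simp [hd]
      have hget : D.getD d [] = [] := by
        rw [PySem.Dict.getD_eq_get?_getD,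
          (PySem.Dict.get?_eq_none_iff_not_mem_keys D d).2 (by rw [hkeys]; simp [hd])]
        rfl
      rw [PySem.Dict.items_insert_of_not_contains D _ hcont, ih,
        pv_dedup_append, if_neg hd, List.map_append]
      congr 1
      · apply List.map_congr_left
        intro k hk
        have hkd : d ≠ k := fun h => hd (h ▸ (PySem.List.mem_dedup cs k).1 hk)
        simp [pv_pvPos_append, hkd]
      · simp [hget, pv_pvPos_append, pv_pvPos_nil_of_not_mem cs d hd, zero_add]

-- inner scatter loop: length, untouched index, hit index
theorem pv_scat_len (ps : List Int) (v : String) : ∀ (o : List String),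
    (ps.foldl (fun o i => PySem.List.pySetD o i v) o).length = o.length := by
  induction ps with
  | nil => intro o; rfl
  | cons j ps ih =>
    intro o
    simp only [List.foldl_cons]
    rw [ih, PySem.List.length_pySetD]

theorem pv_scat_miss (ps : List Int) (v : String) (i : Nat) (hnn : ∀ j ∈ ps, 0 ≤ j)
    (h : (i : Int) ∉ ps) : ∀ (o : List String),
    (ps.foldl (fun o i => PySem.List.pySetD o i v) o)[i]? = o[i]? := by
  induction ps with
  | nil => intro o; rfl
  | cons j ps ih =>
    intro o
    have hj : 0 ≤ j := hnn j (by simp)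
    have hji : j.toNat ≠ i := by
      intro hcon
      exact h (by simp only [List.mem_cons]; left; omega)
    simp only [List.foldl_cons]
    rw [ih (fun x hx => hnn x (by simp [hx])) (fun hx => h (by simp [hx])),
      PySem.List.pySetD_of_nonneg o v hj, List.getElem?_set_ne hji]

theorem pv_scat_hit (ps : List Int) (v : String) (i : Nat) (hnn : ∀ j ∈ ps, 0 ≤ j)
    (h : (i : Int) ∈ ps) : ∀ (o : List String), i < o.length →
    (ps.foldl (fun o i => PySem.List.pySetD o i v) o)[i]? = some v := by
  induction ps with
  | nil => simp at h
  | cons j ps ih =>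
    intro o hlen
    simp only [List.foldl_cons]
    by_cases hmem : (i : Int) ∈ ps
    · exact ih (fun x hx => hnn x (by simp [hx])) hmem _
        (by rw [PySem.List.length_pySetD]; exact hlen)
    · have hji : j = (i : Int) := by
        rcases List.mem_cons.1 h with hx | hx
        · exact hx.symm
        · exact absurd hx hmem
      subst hji
      rw [pv_scat_miss ps v i (fun x hx => hnn x (by simp [hx])) hmem,
        PySem.List.pySetD_of_nonneg o v (by positivity), Int.toNat_natCast,
        List.getElem?_set_self hlen]

theorem pv_scat_fold_len (G : List (Int × List Int)) : ∀ (o : List String),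
    (G.foldl pvScat o).length = o.length := by
  induction G with
  | nil => intro o; rfl
  | cons g G ih =>
    intro o
    simp only [List.foldl_cons]
    rw [ih]
    exact pv_scat_len g.2 _ o

-- outer scatter loop over the (rank, positions) groups of a nodup char list
theorem pv_scatter (cs : List Char) (i : Nat) (hi : i < cs.length) :
    ∀ (us : List Char) (s : Int) (o : List String), us.Nodup → o.length = cs.length →
    ((PySem.List.enumerate (us.map (fun k => pvPos cs k)) s).foldl pvScat o)[i]? =
      if cs[i] ∈ us then some (PySem.Int.toStr (s + (us.idxOf cs[i] : Int))) else o[i]? := by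
  intro us
  induction us with
  | nil => intro s o _ _; simp [PySem.List.enumerate_nil]
  | cons u us ih =>
    intro s o hnd hlen
    simp only [List.map_cons, PySem.List.enumerate_cons, List.foldl_cons]
    have hnd' : us.Nodup := hnd.of_cons
    have hlen1 : (pvScat o (s, pvPos cs u)).length = cs.length := by
      rw [← hlen]; exact pv_scat_len _ _ o
    by_cases hu : cs[i] = u
    · have hnotin : cs[i] ∉ us := by rw [hu]; exact (List.nodup_cons.1 hnd).1
      rw [ih (s + 1) _ hnd' hlen1, if_neg hnotin]
      have hhit : ((i : Int)) ∈ pvPos cs u :=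
        (pv_natCast_mem_pvPos cs u i hi).2 hu
      unfold pvScat
      rw [pv_scat_hit (pvPos cs u) _ i (pv_pvPos_nonneg cs u) hhit o (by omega)]
      rw [if_pos (by simp [hu]), hu, List.idxOf_cons_self]
      simp
    · have hmiss : ((i : Int)) ∉ pvPos cs u := by
        rw [pv_natCast_mem_pvPos cs u i hi]; exact hu
      rw [ih (s + 1) _ hnd' hlen1]
      by_cases hin : cs[i] ∈ us
      · rw [if_pos hin, if_pos (by simp [hin])]
        rw [List.idxOf_cons_ne us (fun h => hu h.symm)]
        have harg : s + ((us.idxOf cs[i] + 1 : Nat) : Int) = s + 1 + (us.idxOf cs[i] : Int) := by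
          push_cast; ring
        rw [harg]
      · rw [if_neg hin, if_neg (by simp [hin, hu])]
        unfold pvScat
        exact pv_scat_miss (pvPos cs u) _ i (pv_pvPos_nonneg cs u) hmiss o

-- B's output, characterized
theorem pvB_char (cs : List Char) :
    ((PySem.List.enumerate
        (((PySem.List.enumerate cs).foldl pvOccStep PySem.Dict.empty).values))).foldl pvScat
        (List.replicate cs.length "") =
      cs.map (fun c => PySem.Int.toStr ((PySem.List.dedup cs).idxOf c : Int)) := by
  have hvals : ((PySem.List.enumerate cs).foldl pvOccStep PySem.Dict.empty).values =
      (PySem.List.dedup cs).map (fun k => pvPos cs k) := by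
    simp only [PySem.Dict.values, pv_occ_items, List.map_map]
    rfl
  rw [hvals]
  apply List.ext_getElem?
  intro i
  by_cases hi : i < cs.length
  · rw [pv_scatter cs i hi (PySem.List.dedup cs) 0 _ (PySem.List.nodup_dedup cs)
      (List.length_replicate)]
    rw [if_pos ((PySem.List.mem_dedup cs _).2 (List.getElem_mem hi))]
    rw [List.getElem?_map, List.getElem?_eq_getElem hi]
    simp
  · have h1 : (((PySem.List.enumerate ((PySem.List.dedup cs).map fun k => pvPos cs k) 0).foldl
        pvScat (List.replicate cs.length ""))).length ≤ i := by
      rw [pv_scat_fold_len, List.length_replicate]; omega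
    rw [List.getElem?_eq_none h1, List.getElem?_eq_none (by simp; omega)]

-- ---------- assembly ----------
theorem patternFinder_spec_aux (word : String) : patternFinder word = patternFinder_alt word := by
  unfold patternFinder patternFinder_alt
  have hid : ∀ c ∈ (PySem.Str.upper word).toList, PySem.Chars.upperChar c = c := by
    intro c hcmem
    rw [PySem.Str.toList_upper] at hcmem
    obtain ⟨x, -, rfl⟩ := List.mem_map.1 hcmem
    exact pv_upperChar_idem x
  have hA : (PySem.Str.upper word).toList.foldl
      (fun (st : List Char × String) char =>
        if PySem.Chars.isIn [PySem.Chars.upperChar char] st.1 then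
          (st.1, st.2 ++ PySem.Int.toStr (PySem.Chars.find st.1 [PySem.Chars.upperChar char]))
        else
          (st.1 ++ [PySem.Chars.upperChar char], st.2 ++ PySem.Int.toStr (st.1.length : Int)))
      ([], "") = (PySem.Str.upper word).toList.foldl pvStepA ([], "") := by
    apply PySem.List.foldl_congr_mem
    intro acc x hx
    rw [hid x hx]
    rfl
  rw [hA, pvA_char]
  have hB := pvB_char (PySem.Str.upper word).toList
  exact (congrArg String.join hB).symm

-- ===== VERDICT (by name: the statement is the Claim_ definition above) =====
theorem patternFinder_spec : Claim_equal_patternFinder := by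
  intro word _
  unfold Spec_patternFinder
  exact patternFinder_spec_aux word
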